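-- pv_equiv track=rewrite | github.com/Sumedha494/Practise | count_vowels_consonants.py | find_vowels_consonants
-- ===== SOURCE A (Python) =====
-- def find_vowels_consonants(string):
--     string_lower = string.lower()
--
--     vowels_found = set()
--     consonants_found = set()
--
--     for char in string_lower:
--         if char in 'aeiou':
--             vowels_found.add(char)
--         elif char in 'bcdfghjklmnpqrstvwxyz':
--             consonants_found.add(char)
--
--     return sorted(vowels_found), sorted(consonants_found)
-- ===== SOURCE B (Python) =====
-- def find_vowels_consonants(string):
--     lowered = string.lower()
--     vowels = [c for c in 'aeiou' if c in lowered]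
--     consonants = [c for c in 'bcdfghjklmnpqrstvwxyz' if c in lowered]
--     return vowels, consonants
-- ===== Notes on version B (the rewrite author's own statement) =====
-- stated objective: alternative
-- what changed: Instead of scanning the string and accumulating two sets that are then sorted, B iterates the fixed alphabetical vowel/consonant strings and keeps each letter that occurs in the lowered string, so the results are sorted by construction with no set and no sort.
import Mathlib
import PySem

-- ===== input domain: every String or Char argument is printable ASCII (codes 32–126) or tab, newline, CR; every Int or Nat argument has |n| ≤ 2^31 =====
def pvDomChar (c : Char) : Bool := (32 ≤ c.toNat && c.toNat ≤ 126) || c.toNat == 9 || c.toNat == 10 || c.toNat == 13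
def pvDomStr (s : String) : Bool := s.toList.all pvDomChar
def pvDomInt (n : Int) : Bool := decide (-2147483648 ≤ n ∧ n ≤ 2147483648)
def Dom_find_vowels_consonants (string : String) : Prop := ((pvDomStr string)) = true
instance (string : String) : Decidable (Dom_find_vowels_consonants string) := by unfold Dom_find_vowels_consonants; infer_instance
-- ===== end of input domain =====

-- B iterates the fixed alphabetical vowel/consonant strings and keeps each letter occurring in the
-- lowered string, so the results are sorted by construction — no sets and no sort (alternative, same cost).

-- ===== PORT A =====
def pvVowels : List Char := "aeiou".toList
def pvConsonants : List Char := "bcdfghjklmnpqrstvwxyz".toList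

def pvStepA (acc : PySem.Set Char × PySem.Set Char) (ch : Char) : PySem.Set Char × PySem.Set Char :=
  if ch ∈ pvVowels then (PySem.Set.add acc.1 ch, acc.2)
  else if ch ∈ pvConsonants then (acc.1, PySem.Set.add acc.2 ch)
  else acc

def find_vowels_consonants (string : String) : List String × List String :=
  let string_lower := PySem.Chars.lower string.toList
  let p := string_lower.foldl pvStepA (PySem.Set.empty, PySem.Set.empty)
  ((PySem.List.sorted p.1 (fun c => c) false).map (fun c => String.ofList [c]),
   (PySem.List.sorted p.2 (fun c => c) false).map (fun c => String.ofList [c]))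

-- ===== PORT B =====
def find_vowels_consonants_alt (string : String) : List String × List String :=
  let lowered := PySem.Chars.lower string.toList
  (("aeiou".toList.filter (fun c => c ∈ lowered)).map (fun c => String.ofList [c]),
   ("bcdfghjklmnpqrstvwxyz".toList.filter (fun c => c ∈ lowered)).map (fun c => String.ofList [c]))

-- ===== PRECONDITION & SPEC =====
def Spec_find_vowels_consonants (string : String) (out : List String × List String) : Prop := out = find_vowels_consonants_alt string
instance (string : String) (out : List String × List String) : Decidable (Spec_find_vowels_consonants string out) := by unfold Spec_find_vowels_consonants; infer_instance

-- ===== CLAIM (what is proved, stated in full; the proofs are below) =====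
def Claim_equal_find_vowels_consonants : Prop := ∀ (string : String), Dom_find_vowels_consonants string → Spec_find_vowels_consonants string (find_vowels_consonants string)

-- ===== LEMMAS AND PROOFS =====

lemma pv_cons_not_vowel {x : Char} (h : x ∈ pvConsonants) : x ∉ pvVowels := by
  simp [pvConsonants, pvVowels] at h ⊢
  rcases h with h | h | h | h | h | h | h | h | h | h | h | h | h | h | h | h | h | h | h | h | h <;> subst h <;> decide

lemma pvStepA_mem (l : List Char) (v c : PySem.Set Char) (x : Char) :
    (x ∈ (l.foldl pvStepA (v, c)).1 ↔ x ∈ v ∨ (x ∈ l ∧ x ∈ pvVowels)) ∧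
    (x ∈ (l.foldl pvStepA (v, c)).2 ↔ x ∈ c ∨ (x ∈ l ∧ x ∈ pvConsonants)) := by
  induction l generalizing v c with
  | nil => simp
  | cons a t ih =>
    simp only [List.foldl_cons, pvStepA]
    by_cases hv : a ∈ pvVowels
    · simp only [hv, if_pos]
      rcases ih (PySem.Set.add v a) c with ⟨h1, h2⟩
      constructor
      · rw [h1, PySem.Set.mem_add]
        constructor
        · rintro ((h | rfl) | ⟨hm, hx⟩)
          · exact Or.inl h
          · exact Or.inr ⟨List.mem_cons_self .., hv⟩
          · exact Or.inr ⟨List.mem_cons_of_mem _ hm, hx⟩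
        · rintro (h | ⟨hm, hx⟩)
          · exact Or.inl (Or.inl h)
          · rcases List.mem_cons.mp hm with rfl | hm
            · exact Or.inl (Or.inr rfl)
            · exact Or.inr ⟨hm, hx⟩
      · rw [h2]
        constructor
        · rintro (h | ⟨hm, hx⟩)
          · exact Or.inl h
          · exact Or.inr ⟨List.mem_cons_of_mem _ hm, hx⟩
        · rintro (h | ⟨hm, hx⟩)
          · exact Or.inl h
          · rcases List.mem_cons.mp hm with rfl | hm
            · exact absurd hv (pv_cons_not_vowel hx)
            · exact Or.inr ⟨hm, hx⟩
    · by_cases hc : a ∈ pvConsonants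
      · simp only [hv, hc, if_neg, if_pos, not_false_iff]
        rcases ih v (PySem.Set.add c a) with ⟨h1, h2⟩
        constructor
        · rw [h1]
          constructor
          · rintro (h | ⟨hm, hx⟩)
            · exact Or.inl h
            · exact Or.inr ⟨List.mem_cons_of_mem _ hm, hx⟩
          · rintro (h | ⟨hm, hx⟩)
            · exact Or.inl h
            · rcases List.mem_cons.mp hm with rfl | hm
              · exact absurd hx hv
              · exact Or.inr ⟨hm, hx⟩
        · rw [h2, PySem.Set.mem_add]
          constructor
          · rintro ((h | rfl) | ⟨hm, hx⟩)
            · exact Or.inl h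
            · exact Or.inr ⟨List.mem_cons_self .., hc⟩
            · exact Or.inr ⟨List.mem_cons_of_mem _ hm, hx⟩
          · rintro (h | ⟨hm, hx⟩)
            · exact Or.inl (Or.inl h)
            · rcases List.mem_cons.mp hm with rfl | hm
              · exact Or.inl (Or.inr rfl)
              · exact Or.inr ⟨hm, hx⟩
      · simp only [hv, hc, if_neg, not_false_iff]
        rcases ih v c with ⟨h1, h2⟩
        constructor
        · rw [h1]
          constructor
          · rintro (h | ⟨hm, hx⟩)
            · exact Or.inl h
            · exact Or.inr ⟨List.mem_cons_of_mem _ hm, hx⟩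
          · rintro (h | ⟨hm, hx⟩)
            · exact Or.inl h
            · rcases List.mem_cons.mp hm with rfl | hm
              · exact absurd hx hv
              · exact Or.inr ⟨hm, hx⟩
        · rw [h2]
          constructor
          · rintro (h | ⟨hm, hx⟩)
            · exact Or.inl h
            · exact Or.inr ⟨List.mem_cons_of_mem _ hm, hx⟩
          · rintro (h | ⟨hm, hx⟩)
            · exact Or.inl h
            · rcases List.mem_cons.mp hm with rfl | hm
              · exact absurd hx hc
              · exact Or.inr ⟨hm, hx⟩

lemma pvStepA_nodup (l : List Char) (v c : PySem.Set Char)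
    (hv : v.Nodup) (hc : c.Nodup) :
    (l.foldl pvStepA (v, c)).1.Nodup ∧ (l.foldl pvStepA (v, c)).2.Nodup := by
  induction l generalizing v c with
  | nil => exact ⟨hv, hc⟩
  | cons a t ih =>
    simp only [List.foldl_cons, pvStepA]
    split_ifs with h1 h2
    · exact ih _ _ (PySem.Set.nodup_add _ _ hv) hc
    · exact ih _ _ hv (PySem.Set.nodup_add _ _ hc)
    · exact ih _ _ hv hc

-- sorted of a nodup list whose members are exactly the letters of a strictly increasing
-- alphabet that occur in l equals the filter of that alphabet.
lemma pv_sorted_eq_filter (alph : List Char) (halph : alph.Pairwise (· < ·))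
    (s : List Char) (hnd : s.Nodup) (l : List Char)
    (hmem : ∀ x, x ∈ s ↔ x ∈ l ∧ x ∈ alph) :
    PySem.List.sorted s (fun c => c) false = alph.filter (fun c => c ∈ l) := by
  apply PySem.List.sorted_eq_of_perm_of_pairwise_lt
  · rw [List.perm_ext_iff_of_nodup (List.Nodup.filter _ (halph.nodup)) hnd]
    intro x
    rw [hmem x, List.mem_filter]
    simp [and_comm]
  · exact List.Pairwise.filter _ halph

-- ===== VERDICT (by name: the statement is the Claim_ definition above) =====
theorem find_vowels_consonants_spec : Claim_equal_find_vowels_consonants := by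
  intro s _
  unfold Spec_find_vowels_consonants find_vowels_consonants find_vowels_consonants_alt
  simp only []
  set l := PySem.Chars.lower s.toList with hl
  have hmem := pvStepA_mem l PySem.Set.empty PySem.Set.empty
  have hnd := pvStepA_nodup l PySem.Set.empty PySem.Set.empty List.nodup_nil List.nodup_nil
  rw [pv_sorted_eq_filter pvVowels (by decide) _ hnd.1 l
        (fun x => by rw [(hmem x).1]; simp [PySem.Set.empty]),
      pv_sorted_eq_filter pvConsonants (by decide) _ hnd.2 l
        (fun x => by rw [(hmem x).2]; simp [PySem.Set.empty])]
  rfl
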